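-- pv_equiv track=rewrite | github.com/mgtezak/Advent-of-Code-Puzzle-Solver | lib/solutions/aoc2016.py | aoc2016_day13_part1
-- ===== SOURCE A (Python) =====
-- from collections import deque
--
-- def aoc2016_day13_part1(puzzle_input):
--     puzzle_input = int(puzzle_input)
--
--     def is_wall(x, y):
--         result = x*x + 3*x + 2*x*y + y + y*y + puzzle_input
--         return bool(bin(result).count('1') % 2)
--
--     visited = {(1, 1)}
--     q = deque([(1, 1, 0)])
--     while q:
--         x, y, steps = q.popleft()
--         if x == 31 and y == 39:
--             break
--         for i, j in {(x+1, y), (x-1, y), (x, y+1), (x, y-1)} - visited: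
--             if i < 0 or j < 0 or is_wall(i, j):
--                 continue
--             q.append((i, j, steps+1))
--             visited.add((i, j))
--
--     return steps
-- ===== SOURCE B (Python) =====
-- def aoc2016_day13_part1(puzzle_input):
--     favorite = int(puzzle_input)
--
--     def is_wall(x, y):
--         result = x*x + 3*x + 2*x*y + y + y*y + favorite
--         return bool(bin(result).count('1') % 2)
--
--     visited = {(1, 1)}
--     frontier = [(1, 1)]
--     steps = 0
--     while True:
--         if (31, 39) in frontier:
--             return steps
--         nxt = []
--         for x, y in frontier:
--             for i, j in ((x+1, y), (x-1, y), (x, y+1), (x, y-1)):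
--                 if i >= 0 and j >= 0 and (i, j) not in visited and not is_wall(i, j):
--                     visited.add((i, j))
--                     nxt.append((i, j))
--         if not nxt:
--             return steps
--         frontier = nxt
--         steps += 1
-- ===== Notes on version B (the rewrite author's own statement) =====
-- stated objective: alternative
-- what changed: Replaces the deque of (x,y,steps) triples popped one node at a time with a level-order BFS that keeps a frontier list and a single step counter, detecting the target by frontier membership and returning the last non-empty layer's index when the region is exhausted.
import Mathlib
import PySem

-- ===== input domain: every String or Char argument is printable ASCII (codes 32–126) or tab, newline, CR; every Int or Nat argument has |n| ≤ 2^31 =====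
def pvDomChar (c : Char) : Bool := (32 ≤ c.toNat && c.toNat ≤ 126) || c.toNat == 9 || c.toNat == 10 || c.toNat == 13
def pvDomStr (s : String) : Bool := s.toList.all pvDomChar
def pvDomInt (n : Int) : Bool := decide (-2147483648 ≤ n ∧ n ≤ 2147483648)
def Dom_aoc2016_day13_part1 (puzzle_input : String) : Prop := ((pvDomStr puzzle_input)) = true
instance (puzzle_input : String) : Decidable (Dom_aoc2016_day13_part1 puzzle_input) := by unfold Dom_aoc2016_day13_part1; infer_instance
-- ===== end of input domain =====

-- B rewrites A's deque-of-(x,y,steps) BFS as a level-order BFS (frontier list + step counter); objective: alternative.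
-- Totalization of the unbounded search (both ports, analogous to fuel): cells are confined to 0 ≤ x,y ≤ pvBox = 2^20-1
-- and the loops carry a fuel counter; the lemmas below show the fuel cannot run out inside the box, so each port computes
-- its Python's BFS step for step whenever that search stays below coordinate 2^20.


-- ===== PORT A =====

-- helpers shared by both ports (the same `is_wall` and the same four neighbours appear verbatim in both Pythons)

def pvBox : Int := 1048575        -- 2^20 - 1: the totalization box bound
def pvFuel : Nat := 1099511627776 -- 2^40: number of cells in the box, hence a bound on the BFS work inside it

def isWall (n x y : Int) : Bool :=
  PySem.Int.bitCount (x * x + 3 * x + 2 * x * y + y + y * y + n) % 2 == 1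

def nbrs (x y : Int) : List (Int × Int) := [(x + 1, y), (x - 1, y), (x, y + 1), (x, y - 1)]

-- A's inner loop: skip visited neighbours (the set difference; the four neighbours are distinct, so computing the
-- difference up front and testing membership per neighbour agree), then the `continue` tests, else enqueue a triple.
def pushA (n sp : Int) (acc : List (Int × Int × Int) × PySem.Set (Int × Int)) (c : Int × Int) :
    List (Int × Int × Int) × PySem.Set (Int × Int) :=
  if c ∈ acc.2 then acc
  else if c.1 < 0 ∨ c.2 < 0 ∨ isWall n c.1 c.2 = true ∨ pvBox < c.1 ∨ pvBox < c.2 then acc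
  else (acc.1 ++ [(c.1, c.2, sp)], PySem.Set.add acc.2 c)

-- A's `while q:` loop; on fuel exhaustion (proved unreachable inside the box) it returns the current `steps`.
def aocLoopA (n : Int) : Nat → List (Int × Int × Int) → PySem.Set (Int × Int) → Int → Int
  | 0, _, _, steps => steps
  | _ + 1, [], _, steps => steps
  | fuel + 1, (x, y, s) :: rest, vis, _ =>
    if x = 31 ∧ y = 39 then s
    else
      aocLoopA n fuel ((nbrs x y).foldl (pushA n (s + 1)) (rest, vis)).1
        ((nbrs x y).foldl (pushA n (s + 1)) (rest, vis)).2 s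

def aoc2016_day13_part1 (puzzle_input : String) : Int :=
  match PySem.Int.ofStr? puzzle_input with
  | none => 0   -- unreachable under Pre_: int(puzzle_input) raises ValueError
  | some n => aocLoopA n (pvFuel + 1) [(1, 1, 0)] (PySem.Set.ofList [(1, 1)]) 0

-- ===== PORT B =====

-- B's inner test: `i >= 0 and j >= 0 and (i,j) not in visited and not is_wall(i,j)`, then mark visited and append.
def pushB (n : Int) (acc : List (Int × Int) × PySem.Set (Int × Int)) (c : Int × Int) :
    List (Int × Int) × PySem.Set (Int × Int) :=
  if 0 ≤ c.1 ∧ 0 ≤ c.2 ∧ c ∉ acc.2 ∧ isWall n c.1 c.2 = false ∧ c.1 ≤ pvBox ∧ c.2 ≤ pvBox then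
    (acc.1 ++ [c], PySem.Set.add acc.2 c)
  else acc

def expandB (n : Int) (acc : List (Int × Int) × PySem.Set (Int × Int)) (c : Int × Int) :
    List (Int × Int) × PySem.Set (Int × Int) :=
  (nbrs c.1 c.2).foldl (pushB n) acc

-- B's `while True:` loop, one level per iteration.
def aocLoopB (n : Int) : Nat → PySem.Set (Int × Int) → List (Int × Int) → Int → Int
  | 0, _, _, steps => steps
  | fuel + 1, vis, frontier, steps =>
    if (31, 39) ∈ frontier then steps
    else
      if (frontier.foldl (expandB n) ([], vis)).1 = [] then steps
      else aocLoopB n fuel (frontier.foldl (expandB n) ([], vis)).2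
        (frontier.foldl (expandB n) ([], vis)).1 (steps + 1)

def aoc2016_day13_part1_alt (puzzle_input : String) : Int :=
  match PySem.Int.ofStr? puzzle_input with
  | none => 0   -- unreachable under Pre_: int(puzzle_input) raises ValueError
  | some n => aocLoopB n pvFuel (PySem.Set.ofList [(1, 1)]) [(1, 1)] 0

-- ===== PRECONDITION & SPEC =====
-- Pre_ excludes exactly the strings int() rejects, on which A raises ValueError.
def Pre_aoc2016_day13_part1 (puzzle_input : String) : Prop :=
  (PySem.Int.ofStr? puzzle_input).isSome = true
instance (puzzle_input : String) : Decidable (Pre_aoc2016_day13_part1 puzzle_input) := by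
  unfold Pre_aoc2016_day13_part1; infer_instance

def pvWitness_aoc2016_day13_part1 : String := "7"

def Spec_aoc2016_day13_part1 (puzzle_input : String) (out : Int) : Prop := out = aoc2016_day13_part1_alt puzzle_input
instance (puzzle_input : String) (out : Int) : Decidable (Spec_aoc2016_day13_part1 puzzle_input out) := by unfold Spec_aoc2016_day13_part1; infer_instance

-- ===== CLAIM (what is proved, stated in full; the proofs are below) =====
def Claim_equal_aoc2016_day13_part1 : Prop := ∀ (puzzle_input : String), Dom_aoc2016_day13_part1 puzzle_input → Pre_aoc2016_day13_part1 puzzle_input → Spec_aoc2016_day13_part1 puzzle_input (aoc2016_day13_part1 puzzle_input)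

-- ===== LEMMAS AND PROOFS =====

-- the acceptance condition both pushes share
abbrev pvOk (n : Int) (vis : PySem.Set (Int × Int)) (c : Int × Int) : Prop :=
  0 ≤ c.1 ∧ 0 ≤ c.2 ∧ c ∉ vis ∧ isWall n c.1 c.2 = false ∧ c.1 ≤ pvBox ∧ c.2 ≤ pvBox

def tri (sp : Int) (c : Int × Int) : Int × Int × Int := (c.1, c.2, sp)

lemma pushA_eq (n sp : Int) (acc : List (Int × Int × Int) × PySem.Set (Int × Int)) (c : Int × Int) :
    pushA n sp acc c =
      if pvOk n acc.2 c then (acc.1 ++ [tri sp c], acc.2 ++ [c]) else acc := by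
  unfold pushA pvOk
  by_cases hm : c ∈ acc.2
  · rw [if_pos hm, if_neg (fun h => h.2.2.1 hm)]
  · by_cases hbad : c.1 < 0 ∨ c.2 < 0 ∨ isWall n c.1 c.2 = true ∨ pvBox < c.1 ∨ pvBox < c.2
    · rw [if_neg hm, if_pos hbad, if_neg]
      rintro ⟨a, b, m, w, u, v⟩
      rcases hbad with h | h | h | h | h
      · omega
      · omega
      · simp [h] at w
      · omega
      · omega
    · push Not at hbad
      rw [if_neg hm, if_neg (by push Not; exact hbad),
        if_pos ⟨hbad.1, hbad.2.1, hm, by simpa using hbad.2.2.1, hbad.2.2.2.1, hbad.2.2.2.2⟩,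
        PySem.Set.add_of_not_mem hm]
      rfl

lemma pushB_eq (n : Int) (acc : List (Int × Int) × PySem.Set (Int × Int)) (c : Int × Int) :
    pushB n acc c = if pvOk n acc.2 c then (acc.1 ++ [c], acc.2 ++ [c]) else acc := by
  unfold pushB pvOk
  by_cases h : 0 ≤ c.1 ∧ 0 ≤ c.2 ∧ c ∉ acc.2 ∧ isWall n c.1 c.2 = false ∧ c.1 ≤ pvBox ∧ c.2 ≤ pvBox
  · rw [if_pos h, if_pos h, PySem.Set.add_of_not_mem h.2.2.1]
  · rw [if_neg h, if_neg h]

-- the output list of a push fold does not depend on the accumulated output prefix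
lemma pushB_prefix (n : Int) (cs : List (Int × Int)) : ∀ (N : List (Int × Int)) (vis : PySem.Set (Int × Int)),
    cs.foldl (pushB n) (N, vis) =
      (N ++ (cs.foldl (pushB n) ([], vis)).1, (cs.foldl (pushB n) ([], vis)).2) := by
  induction cs with
  | nil => simp
  | cons c cs ih =>
    intro N vis
    simp only [List.foldl_cons, pushB_eq]
    by_cases h : pvOk n vis c
    · rw [if_pos h, if_pos h]
      simp only [List.nil_append]
      rw [ih (N ++ [c]), ih [c]]
      simp
    · rw [if_neg h, if_neg h, ih N]

-- A's per-pop expansion is B's push fold, with triples instead of pairs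
lemma pushA_rel (n sp : Int) (cs : List (Int × Int)) : ∀ (q : List (Int × Int × Int)) (vis : PySem.Set (Int × Int)),
    cs.foldl (pushA n sp) (q, vis) =
      (q ++ ((cs.foldl (pushB n) ([], vis)).1).map (tri sp), (cs.foldl (pushB n) ([], vis)).2) := by
  induction cs with
  | nil => simp
  | cons c cs ih =>
    intro q vis
    simp only [List.foldl_cons, pushA_eq, pushB_eq]
    by_cases h : pvOk n vis c
    · rw [if_pos h, if_pos h]
      simp only [List.nil_append]
      rw [ih (q ++ [tri sp c]), pushB_prefix n cs [c]]
      simp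
    · rw [if_neg h, if_neg h, ih q]

def pvInBox (c : Int × Int) : Prop := 0 ≤ c.1 ∧ c.1 ≤ pvBox ∧ 0 ≤ c.2 ∧ c.2 ≤ pvBox

-- a push/expand fold appends one block Δ of fresh in-box cells to both its output list and the visited set
lemma pushB_inv (n : Int) (cs : List (Int × Int)) : ∀ (N : List (Int × Int)) (vis : PySem.Set (Int × Int)),
    vis.Nodup →
    ∃ Δ, cs.foldl (pushB n) (N, vis) = (N ++ Δ, vis ++ Δ) ∧ (vis ++ Δ).Nodup ∧ ∀ c ∈ Δ, pvInBox c := by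
  induction cs with
  | nil => intro N vis h; exact ⟨[], by simp, by simpa using h, by simp⟩
  | cons c cs ih =>
    intro N vis hnd
    simp only [List.foldl_cons, pushB_eq]
    by_cases h : pvOk n vis c
    · rw [if_pos h]
      obtain ⟨Δ, e, nd, bx⟩ := ih (N ++ [c]) (vis ++ [c])
        (by
          simp only [List.nodup_append, hnd, true_and]
          refine ⟨by simp, ?_⟩
          intro a ha b hb
          rcases List.mem_singleton.mp hb with rfl
          exact fun he => h.2.2.1 (he ▸ ha))
      exact ⟨[c] ++ Δ, by simpa using e, by simpa using nd,
        by
          intro d hd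
          rcases List.mem_append.mp hd with hd | hd
          · rcases List.mem_singleton.mp hd with rfl
            exact ⟨h.1, h.2.2.2.2.1, h.2.1, h.2.2.2.2.2⟩
          · exact bx d hd⟩
    · rw [if_neg h]; exact ih N vis hnd

lemma expandB_inv (n : Int) (L : List (Int × Int)) : ∀ (N : List (Int × Int)) (vis : PySem.Set (Int × Int)),
    vis.Nodup →
    ∃ Δ, L.foldl (expandB n) (N, vis) = (N ++ Δ, vis ++ Δ) ∧ (vis ++ Δ).Nodup ∧ ∀ c ∈ Δ, pvInBox c := by
  induction L with
  | nil => intro N vis h; exact ⟨[], by simp, by simpa using h, by simp⟩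
  | cons c L ih =>
    intro N vis hnd
    simp only [List.foldl_cons]
    obtain ⟨Δ₁, e₁, nd₁, bx₁⟩ := pushB_inv n (nbrs c.1 c.2) N vis hnd
    have : expandB n (N, vis) c = (N ++ Δ₁, vis ++ Δ₁) := e₁
    rw [this]
    obtain ⟨Δ₂, e₂, nd₂, bx₂⟩ := ih (N ++ Δ₁) (vis ++ Δ₁) nd₁
    refine ⟨Δ₁ ++ Δ₂, by simpa using e₂, by simpa using nd₂, ?_⟩
    intro d hd
    rcases List.mem_append.mp hd with hd | hd
    · exact bx₁ d hd
    · exact bx₂ d hd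

def pvEnc (c : Int × Int) : Nat := c.1.toNat * 1048576 + c.2.toNat

-- a duplicate-free list of in-box cells has at most pvFuel elements
lemma pv_card_le (V : List (Int × Int)) (hnd : V.Nodup) (hbox : ∀ c ∈ V, pvInBox c) :
    V.length ≤ pvFuel := by
  have hW : (V.map pvEnc).Nodup := by
    refine List.Nodup.map_on ?_ hnd
    intro x hx y hy he
    obtain ⟨a1, b1, d1, e1⟩ := hbox x hx
    obtain ⟨a2, b2, d2, e2⟩ := hbox y hy
    have hb : pvBox = 1048575 := rfl
    rw [hb] at b1 e1 b2 e2
    unfold pvEnc at he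
    have : x.1 = y.1 ∧ x.2 = y.2 := by omega
    exact Prod.ext this.1 this.2
  have h1 : (V.map pvEnc).toFinset ⊆ Finset.range pvFuel := by
    intro x hx
    obtain ⟨c, hc, rfl⟩ := List.mem_map.mp (List.mem_toFinset.mp hx)
    obtain ⟨a, b, d, e⟩ := hbox c hc
    have hb : pvBox = 1048575 := rfl
    rw [hb] at b e
    refine Finset.mem_range.mpr ?_
    unfold pvEnc
    have hf : pvFuel = 1099511627776 := rfl
    omega
  have h2 := Finset.card_le_card h1
  rw [List.toFinset_card_of_nodup hW, Finset.card_range, List.length_map] at h2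
  exact h2

-- processing one BFS level of A's queue = one expandB fold of B
lemma pv_inner (n : Int) (L₁ : List (Int × Int)) : ∀ (M N : List (Int × Int)) (vis : PySem.Set (Int × Int)) (s x : Int) (f : Nat),
    (31, 39) ∉ L₁ →
    aocLoopA n (L₁.length + f) (L₁.map (tri s) ++ M.map (tri s) ++ N.map (tri (s + 1))) vis x =
      aocLoopA n f (M.map (tri s) ++ ((L₁.foldl (expandB n) (N, vis)).1).map (tri (s + 1)))
        (L₁.foldl (expandB n) (N, vis)).2 (if L₁ = [] then x else s) := by
  induction L₁ with
  | nil => intro M N vis s x f h; simp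
  | cons c L₁ ih =>
    intro M N vis s x f htgt
    have hc : ¬(c.1 = 31 ∧ c.2 = 39) := by
      intro h
      exact htgt (by
        have : c = (31, 39) := Prod.ext h.1 h.2
        simp [this])
    simp only [List.length_cons, List.map_cons, List.cons_append, tri]
    show aocLoopA n (L₁.length + 1 + f) ((c.1, c.2, s) :: (L₁.map (tri s) ++ M.map (tri s) ++ N.map (tri (s + 1)))) vis x = _
    rw [show L₁.length + 1 + f = (L₁.length + f) + 1 by omega]
    unfold aocLoopA
    rw [if_neg hc]
    rw [pushA_rel n (s + 1) (nbrs c.1 c.2) (L₁.map (tri s) ++ M.map (tri s) ++ N.map (tri (s + 1))) vis]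
    have hE : expandB n (N, vis) c =
        (N ++ ((nbrs c.1 c.2).foldl (pushB n) ([], vis)).1, ((nbrs c.1 c.2).foldl (pushB n) ([], vis)).2) := by
      unfold expandB
      rw [pushB_prefix n (nbrs c.1 c.2) N vis]
    have hq : L₁.map (tri s) ++ M.map (tri s) ++ N.map (tri (s + 1)) ++
        (((nbrs c.1 c.2).foldl (pushB n) ([], vis)).1).map (tri (s + 1)) =
        L₁.map (tri s) ++ M.map (tri s) ++
          (N ++ ((nbrs c.1 c.2).foldl (pushB n) ([], vis)).1).map (tri (s + 1)) := by
      simp [List.map_append]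
    rw [hq]
    have htgt' : (31, 39) ∉ L₁ := fun h => htgt (List.mem_cons_of_mem c h)
    rw [ih M (N ++ ((nbrs c.1 c.2).foldl (pushB n) ([], vis)).1) ((nbrs c.1 c.2).foldl (pushB n) ([], vis)).2 s s f htgt']
    have hfold : (c :: L₁).foldl (expandB n) (N, vis) =
        L₁.foldl (expandB n) (N ++ ((nbrs c.1 c.2).foldl (pushB n) ([], vis)).1,
          ((nbrs c.1 c.2).foldl (pushB n) ([], vis)).2) := by
      rw [List.foldl_cons, hE]
    rw [hfold]
    have hif : (if L₁ = [] then s else s) = (if (c :: L₁) = [] then x else s) := by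
      simp
    rw [hif]
    rw [← aocLoopA.eq_def]

-- if the target is in the current level, A's loop returns that level's step count
lemma pv_target (n : Int) (L : List (Int × Int)) (hmem : (31, 39) ∈ L) (hnd : L.Nodup)
    (vis : PySem.Set (Int × Int)) (s x : Int) (f : Nat) (hf : L.length ≤ f) :
    aocLoopA n f (L.map (tri s)) vis x = s := by
  obtain ⟨L₁, L₂, rfl⟩ := List.append_of_mem hmem
  have hnotin : (31, 39) ∉ L₁ := by
    rw [List.nodup_append] at hnd
    intro h
    exact absurd rfl (hnd.2.2 (31, 39) h (31, 39) List.mem_cons_self)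
  have hlen : L₁.length + (f - L₁.length) = f := by
    simp [List.length_append] at hf
    omega
  have hf2 : f - L₁.length = (f - L₁.length - 1) + 1 := by
    simp [List.length_append] at hf
    omega
  have h := pv_inner n L₁ ((31, 39) :: L₂) [] vis s x (f - L₁.length) hnotin
  rw [hlen] at h
  simp only [List.map_nil, List.append_nil, ← List.map_append] at h
  rw [h, hf2]
  rw [List.map_cons]
  show aocLoopA n _ ((31, 39, s) :: _) _ _ = s
  rw [aocLoopA.eq_def]
  simp

-- the simulation: A's queue BFS equals B's level BFS, given enough fuel for the box
lemma pv_main (n : Int) : ∀ (fB : Nat) (vis : PySem.Set (Int × Int)) (L : List (Int × Int)) (s x : Int) (fA : Nat),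
    L ≠ [] → L.Nodup → (∀ c ∈ L, c ∈ vis) → vis.Nodup → (∀ c ∈ vis, pvInBox c) →
    L.length + (pvFuel - vis.length) + 1 ≤ fA → (pvFuel - vis.length) + 1 ≤ fB →
    aocLoopA n fA (L.map (tri s)) vis x = aocLoopB n fB vis L s := by
  intro fB
  induction fB with
  | zero => intro vis L s x fA hne hnd hsub hvnd hvbox hfA hfB; omega
  | succ fB ih =>
    intro vis L s x fA hne hnd hsub hvnd hvbox hfA hfB
    show aocLoopA n fA (List.map (tri s) L) vis x =
      (if (31, 39) ∈ L then s
       else if (List.foldl (expandB n) ([], vis) L).1 = [] then s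
       else aocLoopB n fB (List.foldl (expandB n) ([], vis) L).2 (List.foldl (expandB n) ([], vis) L).1 (s + 1))
    by_cases htgt : (31, 39) ∈ L
    · rw [if_pos htgt]
      exact pv_target n L htgt hnd vis s x fA (by omega)
    · rw [if_neg htgt]
      obtain ⟨Δ, eΔ, ndΔ, bxΔ⟩ := expandB_inv n L [] vis hvnd
      simp only [List.nil_append] at eΔ
      have hvlen : vis.length ≤ pvFuel := pv_card_le vis hvnd hvbox
      have hvlen2 : (vis ++ Δ).length ≤ pvFuel := pv_card_le (vis ++ Δ) ndΔ (by
        intro c hc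
        rcases List.mem_append.mp hc with hc | hc
        · exact hvbox c hc
        · exact bxΔ c hc)
      have hinner := pv_inner n L [] [] vis s x (fA - L.length) htgt
      rw [show L.length + (fA - L.length) = fA by omega] at hinner
      simp only [List.map_nil, List.append_nil, List.nil_append] at hinner
      rw [eΔ] at hinner
      rw [if_neg hne] at hinner
      rw [hinner]
      by_cases hΔ : Δ = []
      · subst hΔ
        rw [eΔ, if_pos rfl]
        rw [aocLoopA.eq_def]
        rcases Nat.exists_eq_add_of_le (show 1 ≤ fA - L.length by omega) with ⟨k, hk⟩
        cases h : fA - L.length with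
        | zero => omega
        | succ m => simp
      · rw [eΔ, if_neg hΔ]
        have hΔnd : Δ.Nodup := (List.nodup_append.mp ndΔ).2.1
        have hlen : Δ.length ≥ 1 := by
          cases Δ with
          | nil => exact absurd rfl hΔ
          | cons a t => simp
        refine ih (vis ++ Δ) Δ (s + 1) s (fA - L.length) hΔ hΔnd ?_ ndΔ ?_ ?_ ?_
        · intro c hc; exact List.mem_append.mpr (Or.inr hc)
        · intro c hc
          rcases List.mem_append.mp hc with hc | hc
          · exact hvbox c hc
          · exact bxΔ c hc
        · simp only [List.length_append] at hvlen2 ⊢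
          omega
        · simp only [List.length_append] at hvlen2 ⊢
          omega

-- ===== VERDICT (by name: the statement is the Claim_ definition above) =====
theorem aoc2016_day13_part1_spec : Claim_equal_aoc2016_day13_part1 := by
  intro puzzle_input _hDom hPre
  unfold Spec_aoc2016_day13_part1 aoc2016_day13_part1 aoc2016_day13_part1_alt
  unfold Pre_aoc2016_day13_part1 at hPre
  obtain ⟨n, hn⟩ := Option.isSome_iff_exists.mp hPre
  rw [hn]
  have hset : PySem.Set.ofList [((1 : Int), (1 : Int))] = [(1, 1)] := by decide
  rw [hset]
  have hpf : pvFuel = 1099511627776 := rfl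
  have h := pv_main n pvFuel [(1, 1)] [(1, 1)] 0 0 (pvFuel + 1)
    (by simp) (by simp) (by intro c hc; simpa using hc) (by simp)
    (by
      intro c hc
      simp only [List.mem_singleton] at hc
      subst hc
      exact ⟨by norm_num, by norm_num [pvBox], by norm_num, by norm_num [pvBox]⟩)
    (by simp; omega) (by simp; omega)
  simpa using h
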